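-- pv_equiv track=rewrite | github.com/protocorn/job_application_agent | Agents/components/executors/ats_dropdown_handlers.py | _get_shortest_typing_string
-- ===== SOURCE A (Python) =====
-- from typing import Optional, Dict, Any, List
--
-- def _get_shortest_typing_string(target: str, all_options: List[str]) -> str:
--     """Get the shortest string that uniquely identifies target among options."""
--     # Try progressively longer prefixes until we find one that's unique
--     for length in range(3, len(target) + 1):
--         prefix = target[:length]
--         # Count how many options start with this prefix
--         matches = sum(1 for opt in all_options if opt and opt.lower().startswith(prefix.lower()))
--         if matches == 1:
--             return prefix
--
--     # Fall back to first word or first 5 chars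
--     first_word = target.split()[0] if ' ' in target else target[:5]
--     return first_word
-- ===== SOURCE B (Python) =====
-- from typing import List
-- def _get_shortest_typing_string(target: str, all_options: List[str]) -> str:
--     """Get the shortest string that uniquely identifies target among options."""
--     # Incrementally shrink a candidate set instead of rescanning all options per length.
--     tlow = target.lower()
--     cands = [opt.lower() for opt in all_options if opt]
--     for length in range(3, len(target) + 1):
--         p = tlow[:length]
--         cands = [c for c in cands if c.startswith(p)]
--         if len(cands) == 1:
--             return target[:length]
--         if not cands:
--             break
--     return target.split()[0] if ' ' in target else target[:5]
-- ===== Notes on version B (the rewrite author's own statement) =====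
-- stated objective: faster
-- what changed: Instead of rescanning and lowercasing all options for every prefix length, B lowercases target and options once and incrementally filters a shrinking candidate list across growing prefix lengths, stopping early when it empties.
-- outside the precondition, e.g. on _get_shortest_typing_string('   ', ['   x']): A returns '   ', B returns '   '
import Mathlib
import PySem

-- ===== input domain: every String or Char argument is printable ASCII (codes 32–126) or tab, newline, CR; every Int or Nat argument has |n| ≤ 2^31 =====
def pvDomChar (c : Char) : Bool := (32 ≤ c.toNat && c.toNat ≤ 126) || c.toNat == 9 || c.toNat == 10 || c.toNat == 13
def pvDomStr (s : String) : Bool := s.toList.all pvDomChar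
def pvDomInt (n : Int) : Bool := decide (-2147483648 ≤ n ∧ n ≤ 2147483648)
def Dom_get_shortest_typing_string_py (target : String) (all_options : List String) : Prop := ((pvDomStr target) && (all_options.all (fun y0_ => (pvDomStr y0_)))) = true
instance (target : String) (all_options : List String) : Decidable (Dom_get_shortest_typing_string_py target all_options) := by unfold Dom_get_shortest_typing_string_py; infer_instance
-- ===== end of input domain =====

-- B replaces A's per-length rescan of all options (re-lowercasing every option at every prefix
-- length) by lowercasing once and incrementally filtering a shrinking candidate list (faster).

-- ===== PORT A =====
-- matches = sum(1 for opt in all_options if opt and opt.lower().startswith(prefix.lower()))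
def pvMatchesA (pre : String) (all_options : List String) : Nat :=
  all_options.countP (fun opt =>
    opt != "" && PySem.Str.startswith (PySem.Str.lower opt) (PySem.Str.lower pre))

-- the 'for length in range(3, len(target)+1)' loop with its early return
def pvAGo (target : String) (all_options : List String) : List Int → Option String
  | [] => none
  | l :: ls =>
    let pre := PySem.Str.slice target none (some l)
    if pvMatchesA pre all_options = 1 then some pre
    else pvAGo target all_options ls

def get_shortest_typing_string_py (target : String) (all_options : List String) : String :=
  match pvAGo target all_options (PySem.List.pyRange 3 (PySem.Str.len target + 1) 1) with
  | some p => p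
  | none =>
    if PySem.Str.isIn " " target then PySem.List.pyGetD (PySem.Str.split₀ target) 0 ""
    else PySem.Str.slice target none (some 5)

-- ===== PORT B =====
-- the loop of Source B: carries the shrinking lowered candidate list, breaks when it empties
def pvBGo (target : String) (tlow : List Char) : List (List Char) → List Int → Option String
  | _, [] => none
  | cands, l :: ls =>
    let p := PySem.List.slice tlow none (some l)
    let cands' := cands.filter (fun c => PySem.Chars.startswith c p)
    if cands'.length = 1 then some (PySem.Str.slice target none (some l))
    else if cands' = [] then none
    else pvBGo target tlow cands' ls

def get_shortest_typing_string_py_alt (target : String) (all_options : List String) : String :=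
  let tlow := PySem.Chars.lower target.toList
  let cands := (all_options.filter (fun o => o != "")).map (fun o => PySem.Chars.lower o.toList)
  match pvBGo target tlow cands (PySem.List.pyRange 3 (PySem.Str.len target + 1) 1) with
  | some r => r
  | none =>
    if PySem.Str.isIn " " target then PySem.List.pyGetD (PySem.Str.split₀ target) 0 ""
    else PySem.Str.slice target none (some 5)

-- ===== PRECONDITION & SPEC =====
-- Pre_ excludes targets that contain a space but split to no words (all-whitespace targets):
-- there A's fallback 'target.split()[0]' raises IndexError (and B's identical fallback raises too);
-- on the rare such targets where the loop returns before the fallback, A and B still agree (see cites).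
def Pre_get_shortest_typing_string_py (target : String) (all_options : List String) : Prop :=
  ¬ (PySem.Str.isIn " " target = true ∧ PySem.Str.split₀ target = [])
instance (target : String) (all_options : List String) : Decidable (Pre_get_shortest_typing_string_py target all_options) := by unfold Pre_get_shortest_typing_string_py; infer_instance

def pvWitness_get_shortest_typing_string_py : String × List String := ("abc", ["abcdef"])

def Spec_get_shortest_typing_string_py (target : String) (all_options : List String) (out : String) : Prop := out = get_shortest_typing_string_py_alt target all_options
instance (target : String) (all_options : List String) (out : String) : Decidable (Spec_get_shortest_typing_string_py target all_options out) := by unfold Spec_get_shortest_typing_string_py; infer_instance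

-- ===== CLAIM (what is proved, stated in full; the proofs are below) =====
def Claim_equal_get_shortest_typing_string_py : Prop := ∀ (target : String) (all_options : List String), Dom_get_shortest_typing_string_py target all_options → Pre_get_shortest_typing_string_py target all_options → Spec_get_shortest_typing_string_py target all_options (get_shortest_typing_string_py target all_options)

-- ===== LEMMAS AND PROOFS =====

-- PySem.Chars.lower is character-wise, so it commutes with take
theorem pv_lower_take (l : List Char) (n : Nat) :
    PySem.Chars.lower (l.take n) = (PySem.Chars.lower l).take n := by
  show (l.take n).map PySem.Chars.lowerChar = _
  simp [List.map_take]
  rfl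

-- A's per-length match count equals the size of B's lowered candidate pool filtered by the lowered prefix
theorem pv_count_eq (target : String) (all_options : List String) (a : Int) (ha : 0 ≤ a) :
    pvMatchesA (PySem.Str.slice target none (some a)) all_options
      = (((all_options.filter (fun o => o != "")).map (fun o => PySem.Chars.lower o.toList)).filter
          (fun c => PySem.Chars.startswith c ((PySem.Chars.lower target.toList).take a.toNat))).length := by
  rw [← List.countP_eq_length_filter, List.countP_map, List.countP_filter]
  unfold pvMatchesA
  apply List.countP_congr
  intro o _
  have hsl : (PySem.Str.slice target none (some a)).toList = target.toList.take a.toNat := by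
    simp [PySem.List.slice_to _ ha]
  simp only [Function.comp, PySem.Str.startswith_eq, PySem.Str.toList_lower, hsl, pv_lower_take]
  rw [Bool.and_comm]

-- refining a filter by a longer prefix subsumes the earlier filter
theorem pv_filter_refine (base : List (List Char)) (q p : List Char) (hqp : q <+: p) :
    (base.filter (fun c => PySem.Chars.startswith c q)).filter (fun c => PySem.Chars.startswith c p)
      = base.filter (fun c => PySem.Chars.startswith c p) := by
  rw [List.filter_filter]
  apply List.filter_congr
  intro c _
  cases hp : PySem.Chars.startswith c p with
  | false => simp
  | true =>
    have : PySem.Chars.startswith c q = true :=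
      (PySem.Chars.startswith_iff c q).mpr (hqp.trans ((PySem.Chars.startswith_iff c p).mp hp))
    simp [this]

-- once the candidate pool filtered by a committed prefix is empty, A's remaining loop finds no unique match
theorem pv_aGo_none (target : String) (all_options : List String) :
    ∀ (n : Nat) (a b : Int) (q : List Char), 0 ≤ a → (b - a).toNat = n → (q.length : Int) ≤ a →
      q <+: PySem.Chars.lower target.toList →
      ((all_options.filter (fun o => o != "")).map (fun o => PySem.Chars.lower o.toList)).filter
        (fun c => PySem.Chars.startswith c q) = [] →
      pvAGo target all_options (PySem.List.pyRange a b 1) = none := by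
  intro n
  induction n with
  | zero =>
    intro a b q _ hn _ _ _
    rw [PySem.List.pyRange_one_eq_nil (by omega)]
    rfl
  | succ m ih =>
    intro a b q ha hn hq hqpre hempty
    rw [PySem.List.pyRange_one_cons (by omega)]
    show (if pvMatchesA (PySem.Str.slice target none (some a)) all_options = 1 then _ else pvAGo target all_options (PySem.List.pyRange (a+1) b 1)) = none
    have hcount := pv_count_eq target all_options a ha
    have hsub : ((all_options.filter (fun o => o != "")).map (fun o => PySem.Chars.lower o.toList)).filter
        (fun c => PySem.Chars.startswith c ((PySem.Chars.lower target.toList).take a.toNat)) = [] := by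
      have hqp : q <+: (PySem.Chars.lower target.toList).take a.toNat := by
        rw [List.prefix_take_iff]
        exact ⟨hqpre, by omega⟩
      rw [← pv_filter_refine _ q _ hqp, hempty]
      rfl
    rw [hcount, hsub]
    simp only [List.length_nil]
    rw [if_neg (by omega)]
    exact ih (a+1) b q (by omega) (by omega) (by omega) hqpre hempty

-- main loop correspondence: B's candidate pool is exactly the options filtered by the committed prefix
theorem pv_main (target : String) (all_options : List String) :
    ∀ (n : Nat) (a b : Int) (q : List Char), 0 ≤ a → (b - a).toNat = n → (q.length : Int) ≤ a →
      q <+: PySem.Chars.lower target.toList →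
      pvAGo target all_options (PySem.List.pyRange a b 1)
        = pvBGo target (PySem.Chars.lower target.toList)
            (((all_options.filter (fun o => o != "")).map (fun o => PySem.Chars.lower o.toList)).filter
              (fun c => PySem.Chars.startswith c q))
            (PySem.List.pyRange a b 1) := by
  intro n
  induction n with
  | zero =>
    intro a b q _ hn _ _
    rw [PySem.List.pyRange_one_eq_nil (by omega)]
    rfl
  | succ m ih =>
    intro a b q ha hn hq hqpre
    set tlow := PySem.Chars.lower target.toList with htlow
    set base := (all_options.filter (fun o => o != "")).map (fun o => PySem.Chars.lower o.toList) with hbase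
    rw [PySem.List.pyRange_one_cons (by omega)]
    have hqp : q <+: tlow.take a.toNat := by
      rw [List.prefix_take_iff]
      exact ⟨hqpre, by omega⟩
    have hslice : PySem.List.slice tlow none (some a) = tlow.take a.toNat := PySem.List.slice_to _ ha
    have hcands : (base.filter (fun c => PySem.Chars.startswith c q)).filter
        (fun c => PySem.Chars.startswith c (PySem.List.slice tlow none (some a)))
        = base.filter (fun c => PySem.Chars.startswith c (tlow.take a.toNat)) := by
      rw [hslice]
      exact pv_filter_refine base q _ hqp
    show (if pvMatchesA (PySem.Str.slice target none (some a)) all_options = 1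
          then some (PySem.Str.slice target none (some a))
          else pvAGo target all_options (PySem.List.pyRange (a+1) b 1)) = _
    show _ = (if ((base.filter (fun c => PySem.Chars.startswith c q)).filter
            (fun c => PySem.Chars.startswith c (PySem.List.slice tlow none (some a)))).length = 1
          then some (PySem.Str.slice target none (some a))
          else if (base.filter (fun c => PySem.Chars.startswith c q)).filter
            (fun c => PySem.Chars.startswith c (PySem.List.slice tlow none (some a))) = []
          then none
          else pvBGo target tlow ((base.filter (fun c => PySem.Chars.startswith c q)).filter
            (fun c => PySem.Chars.startswith c (PySem.List.slice tlow none (some a))))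
            (PySem.List.pyRange (a+1) b 1))
    rw [hcands]
    have hcount := pv_count_eq target all_options a ha
    rw [hcount]
    by_cases h1 : (base.filter (fun c => PySem.Chars.startswith c (tlow.take a.toNat))).length = 1
    · rw [if_pos h1, if_pos h1]
    · rw [if_neg h1, if_neg h1]
      by_cases h0 : base.filter (fun c => PySem.Chars.startswith c (tlow.take a.toNat)) = []
      · rw [if_pos h0]
        have hlen : ((tlow.take a.toNat).length : Int) ≤ a + 1 := by
          have := List.length_take_le a.toNat tlow
          omega
        exact pv_aGo_none target all_options m (a+1) b (tlow.take a.toNat) (by omega) (by omega)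
          hlen (List.take_prefix _ _) h0
      · rw [if_neg h0]
        have hlen : ((tlow.take a.toNat).length : Int) ≤ a + 1 := by
          have := List.length_take_le a.toNat tlow
          omega
        exact ih (a+1) b (tlow.take a.toNat) (by omega) (by omega) hlen (List.take_prefix _ _)

-- the empty committed prefix filters nothing away
theorem pv_filter_nil (base : List (List Char)) :
    base.filter (fun c => PySem.Chars.startswith c ([] : List Char)) = base := by
  apply List.filter_eq_self.mpr
  intro c _
  exact (PySem.Chars.startswith_iff c []).mpr (List.nil_prefix)

-- ===== VERDICT (by name: the statement is the Claim_ definition above) =====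
theorem get_shortest_typing_string_py_spec : Claim_equal_get_shortest_typing_string_py := by
  intro target all_options _ _
  unfold Spec_get_shortest_typing_string_py
  unfold get_shortest_typing_string_py get_shortest_typing_string_py_alt
  have h := pv_main target all_options (PySem.Str.len target + 1 - 3).toNat 3
    (PySem.Str.len target + 1) [] (by norm_num) rfl (by norm_num) (List.nil_prefix)
  rw [pv_filter_nil] at h
  rw [h]
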